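-- pv_equiv track=rewrite | github.com/egementunca/identity-factory-api | identity_factory/api/eca57_lmdb_endpoints.py | compute_permutation
-- ===== SOURCE A (Python) =====
-- from typing import Any, Dict, List, Optional
--
-- def compute_permutation(width: int, gates: List[List[int]]) -> List[int]:
--     """
--     Compute the final permutation mapping from applying all gates.
--     Returns list where result[i] = j means input state i maps to output state j.
--     """
--     N = 1 << width
--     mapping = list(range(N))
--
--     for t, c1, c2 in gates:
--         new_mapping = mapping.copy()
--         for state in range(N):
--             out = mapping[state]
--             ctrl1_set = bool(out & (1 << c1))
--             ctrl2_set = bool(out & (1 << c2))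
--             condition = ctrl1_set or (not ctrl2_set)
--             if condition:
--                 new_mapping[state] = out ^ (1 << t)
--             else:
--                 new_mapping[state] = out
--         mapping = new_mapping
--
--     return mapping
-- ===== SOURCE B (Python) =====
-- def compute_permutation(width, gates):
--     """Per-state composition: thread each input state through all gates,
--     keeping only a single running value instead of a full mapping array."""
--     N = 1 << width
--     result = []
--     for state in range(N):
--         out = state
--         for t, c1, c2 in gates:
--             if (out & (1 << c1)) or not (out & (1 << c2)):
--                 out ^= 1 << t
--         result.append(out)
--     return result
-- ===== Notes on version B (the rewrite author's own statement) =====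
-- stated objective: simpler
-- what changed: A maintains and rebuilds a full N-entry permutation array once per gate (copy + indexed writes); B keeps no array at all and computes each output independently by threading the single state value through the whole gate list, appending the final value.
import Mathlib
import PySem

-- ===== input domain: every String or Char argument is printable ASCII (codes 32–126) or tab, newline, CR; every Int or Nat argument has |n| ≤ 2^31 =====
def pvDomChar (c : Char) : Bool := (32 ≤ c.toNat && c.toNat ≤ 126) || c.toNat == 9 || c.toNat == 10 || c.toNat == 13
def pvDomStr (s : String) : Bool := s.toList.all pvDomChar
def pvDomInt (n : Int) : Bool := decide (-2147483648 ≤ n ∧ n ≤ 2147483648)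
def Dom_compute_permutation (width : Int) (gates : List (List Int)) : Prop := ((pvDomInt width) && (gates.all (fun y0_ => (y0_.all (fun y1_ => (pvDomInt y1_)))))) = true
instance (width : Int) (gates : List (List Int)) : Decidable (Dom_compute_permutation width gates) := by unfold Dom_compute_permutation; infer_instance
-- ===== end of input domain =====

-- B computes each output by threading one state value through the gate list, dropping A's
-- per-gate full-array copy; objective: simpler.


-- ===== PORT A =====
-- Literal port of A: fold over gates; each gate pass copies the mapping and rewrites it
-- entry by entry, reading from the old mapping.  `1 <<< k.toNat` is Python's `1 << k` for
-- k ≥ 0 (Pre_); a gate that does not unpack as [t, c1, c2] raises in Python (outside Pre_).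
def compute_permutation (width : Int) (gates : List (List Int)) : List Int :=
  let N : Int := 1 <<< width.toNat
  gates.foldl (fun mapping g =>
    match g with
    | [t, c1, c2] =>
      (PySem.List.pyRange 0 N 1).foldl (fun nm state =>
        let out := PySem.List.pyGetD mapping state 0
        let ctrl1_set := PySem.Int.band out ((1 : Int) <<< c1.toNat) ≠ 0
        let ctrl2_set := PySem.Int.band out ((1 : Int) <<< c2.toNat) ≠ 0
        if ctrl1_set ∨ ¬ ctrl2_set then
          nm.set state.toNat (PySem.Int.bxor out ((1 : Int) <<< t.toNat))
        else
          nm.set state.toNat out) mapping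
    | _ => mapping) (PySem.List.pyRange 0 N 1)

-- ===== PORT B =====
-- one gate applied to one running value; the `t, c1, c2` bindings port Source B's tuple
-- unpack, exact for three-element gates (Pre_; Python raises on any other length)
def applyGate (out : Int) (g : List Int) : Int :=
  let t := g.getD 0 0
  let c1 := g.getD 1 0
  let c2 := g.getD 2 0
  if PySem.Int.band out ((1 : Int) <<< c1.toNat) ≠ 0 ∨
     PySem.Int.band out ((1 : Int) <<< c2.toNat) = 0 then
    PySem.Int.bxor out ((1 : Int) <<< t.toNat)
  else out

def compute_permutation_alt (width : Int) (gates : List (List Int)) : List Int :=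
  (PySem.List.pyRange 0 ((1 : Int) <<< width.toNat) 1).map (fun state => gates.foldl applyGate state)

-- ===== PRECONDITION & SPEC =====
-- Exactly where Python A returns: width ≥ 0 (1 << width raises otherwise) and
-- width < 63 (list(range(1 << width)) raises OverflowError on a C ssize_t overflow),
-- every gate unpacks as exactly three ints, and every gate entry is ≥ 0 (negative
-- shift raises).
def Pre_compute_permutation (width : Int) (gates : List (List Int)) : Prop :=
  0 ≤ width ∧ width < 63 ∧ ∀ g ∈ gates, g.length = 3 ∧ ∀ x ∈ g, 0 ≤ x
instance (width : Int) (gates : List (List Int)) : Decidable (Pre_compute_permutation width gates) := by unfold Pre_compute_permutation; infer_instance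

def pvWitness_compute_permutation : Int × List (List Int) := (2, [[0, 1, 1], [1, 0, 0]])

def Spec_compute_permutation (width : Int) (gates : List (List Int)) (out : List Int) : Prop := out = compute_permutation_alt width gates
instance (width : Int) (gates : List (List Int)) (out : List Int) : Decidable (Spec_compute_permutation width gates out) := by unfold Spec_compute_permutation; infer_instance

-- ===== CLAIM (what is proved, stated in full; the proofs are below) =====
def Claim_equal_compute_permutation : Prop := ∀ (width : Int) (gates : List (List Int)), Dom_compute_permutation width gates → Pre_compute_permutation width gates → Spec_compute_permutation width gates (compute_permutation width gates)

-- ===== LEMMAS AND PROOFS =====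

-- the indexed-write loop characterised entrywise: later entries untouched, visited ones rewritten
lemma setloop_getElem? (f : Int → Int) (m : List Int) (idxs : List Nat) :
    ∀ (acc : List Int) (i : Nat),
      (idxs.foldl (fun nm s => nm.set s (f (m.getD s 0))) acc)[i]? =
        if i ∈ idxs ∧ i < acc.length then some (f (m.getD i 0)) else acc[i]? := by
  induction idxs with
  | nil => intro acc i; simp
  | cons x xs ih =>
    intro acc i
    simp only [List.foldl_cons, ih, List.length_set, List.mem_cons]
    by_cases hx : i ∈ xs
    · by_cases hl : i < acc.length <;> simp [hx, hl]
    · by_cases hxi : i = x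
      · subst hxi
        by_cases hl : i < acc.length <;>
          simp [hx, hl]
      · simp [hx, hxi, Ne.symm hxi]

-- the whole indexed-write pass over range(len m) is a map
lemma setloop_eq_map (f : Int → Int) (m : List Int) :
    (List.range m.length).foldl (fun nm s => nm.set s (f (m.getD s 0))) m = m.map f := by
  apply List.ext_getElem?
  intro i
  rw [setloop_getElem?]
  by_cases h : i < m.length
  · simp [h, List.getD_eq_getElem?_getD]
  · have h1 : m[i]? = none := by rw [List.getElem?_eq_none_iff]; omega
    simp [h1]
    omega

-- one gate pass of A equals mapping the per-value gate function
lemma stepA_eq_map (N : Int) (m : List Int) (t c1 c2 : Int) (hm : m.length = N.toNat) :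
    (PySem.List.pyRange 0 N 1).foldl (fun nm state =>
        let out := PySem.List.pyGetD m state 0
        let ctrl1_set := PySem.Int.band out ((1 : Int) <<< c1.toNat) ≠ 0
        let ctrl2_set := PySem.Int.band out ((1 : Int) <<< c2.toNat) ≠ 0
        if ctrl1_set ∨ ¬ ctrl2_set then
          nm.set state.toNat (PySem.Int.bxor out ((1 : Int) <<< t.toNat))
        else
          nm.set state.toNat out) m
      = m.map (fun out => applyGate out [t, c1, c2]) := by
    rw [PySem.List.pyRange_one, Int.sub_zero]
    rw [List.foldl_map]
    have hcongr :
        (List.range N.toNat).foldl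
          (fun nm (k : Nat) =>
            let out := PySem.List.pyGetD m ((0 : Int) + (k : Int)) 0
            let ctrl1_set := PySem.Int.band out ((1 : Int) <<< c1.toNat) ≠ 0
            let ctrl2_set := PySem.Int.band out ((1 : Int) <<< c2.toNat) ≠ 0
            if ctrl1_set ∨ ¬ ctrl2_set then
              nm.set ((0 : Int) + (k : Int)).toNat (PySem.Int.bxor out ((1 : Int) <<< t.toNat))
            else
              nm.set ((0 : Int) + (k : Int)).toNat out) m
        = (List.range N.toNat).foldl
            (fun nm (k : Nat) => nm.set k (applyGate (m.getD k 0) [t, c1, c2])) m := by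
      apply PySem.List.foldl_congr_mem
      intro nm k _
      simp only [Int.zero_add, Int.toNat_natCast, PySem.List.pyGetD_natCast, applyGate,
        List.getD_cons_zero, List.getD_cons_succ, ne_eq, not_not]
      split_ifs <;> rfl
    rw [hcongr, ← hm]
    exact setloop_eq_map (fun out => applyGate out [t, c1, c2]) m

-- folding A's per-gate passes = mapping B's composed per-state function
lemma foldl_gates_eq_map (N : Int) :
    ∀ (gates : List (List Int)) (m : List Int), (∀ g ∈ gates, g.length = 3) → m.length = N.toNat →
      gates.foldl (fun mapping g =>
        match g with
        | [t, c1, c2] =>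
          (PySem.List.pyRange 0 N 1).foldl (fun nm state =>
            let out := PySem.List.pyGetD mapping state 0
            let ctrl1_set := PySem.Int.band out ((1 : Int) <<< c1.toNat) ≠ 0
            let ctrl2_set := PySem.Int.band out ((1 : Int) <<< c2.toNat) ≠ 0
            if ctrl1_set ∨ ¬ ctrl2_set then
              nm.set state.toNat (PySem.Int.bxor out ((1 : Int) <<< t.toNat))
            else
              nm.set state.toNat out) mapping
        | _ => mapping) m
      = m.map (fun s => gates.foldl applyGate s) := by
  intro gates
  induction gates with
  | nil => intro m _ _; simp [List.map_id']
  | cons g gs ih =>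
    intro m hlen hm
    have hg := hlen g (List.mem_cons_self ..)
    rcases g with _ | ⟨t, _ | ⟨c1, _ | ⟨c2, _ | _⟩⟩⟩ <;> simp at hg
    rw [List.foldl_cons]
    show gs.foldl _ ((PySem.List.pyRange 0 N 1).foldl _ m) = _
    rw [stepA_eq_map N m t c1 c2 hm,
      ih (m.map fun out => applyGate out [t, c1, c2])
        (fun g hgmem => hlen g (List.mem_cons_of_mem _ hgmem)) (by simpa using hm),
      List.map_map]
    rfl

-- ===== VERDICT (by name: the statement is the Claim_ definition above) =====
theorem compute_permutation_spec : Claim_equal_compute_permutation := by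
  intro width gates _ hpre
  unfold Spec_compute_permutation compute_permutation compute_permutation_alt
  exact foldl_gates_eq_map _ gates _ (fun g hg => (hpre.2.2 g hg).1)
    (by simp [PySem.List.length_pyRange_one])
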